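-- pv_equiv track=rewrite | github.com/WeslleySantiagoo/FlyFood---For-a-Bruta | main.py | enderecar_pontos
-- ===== SOURCE A (Python) =====
-- def enderecar_pontos(matriz):
--     lista_pontos = []
--     coordenadas = {}
--     for l in range(len(matriz)):
--         linha = matriz[l]
--         for c in range(len(linha)):
--             coluna = linha[c]
--             if coluna != '0' and coluna != 0:
--                 lista_pontos.append(coluna)
--                 coordenadas[coluna] = (l, c)
--     return r_inicio(lista_pontos), coordenadas
--
-- def r_inicio(lista):
--     inicio = [item for item in lista if item[0] == 'R']
--     resto = [item for item in lista if item[0] != 'R']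
--     return inicio + resto
-- ===== SOURCE B (Python) =====
-- def enderecar_pontos(matriz):
--     pontos = []
--     coordenadas = {}
--     for l, linha in enumerate(matriz):
--         for c, coluna in enumerate(linha):
--             if coluna != '0' and coluna != 0:
--                 pontos.append(coluna)
--                 coordenadas[coluna] = (l, c)
--     return sorted(pontos, key=lambda p: not p.startswith('R')), coordenadas
-- ===== Notes on version B (the rewrite author's own statement) =====
-- stated objective: alternative
-- what changed: Replaces A's r_inicio (two separate filtering passes over the collected list, concatenated) with a single stable sort keyed on 'does not start with R', and collects the cells via enumerate instead of index ranges.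
import Mathlib
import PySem

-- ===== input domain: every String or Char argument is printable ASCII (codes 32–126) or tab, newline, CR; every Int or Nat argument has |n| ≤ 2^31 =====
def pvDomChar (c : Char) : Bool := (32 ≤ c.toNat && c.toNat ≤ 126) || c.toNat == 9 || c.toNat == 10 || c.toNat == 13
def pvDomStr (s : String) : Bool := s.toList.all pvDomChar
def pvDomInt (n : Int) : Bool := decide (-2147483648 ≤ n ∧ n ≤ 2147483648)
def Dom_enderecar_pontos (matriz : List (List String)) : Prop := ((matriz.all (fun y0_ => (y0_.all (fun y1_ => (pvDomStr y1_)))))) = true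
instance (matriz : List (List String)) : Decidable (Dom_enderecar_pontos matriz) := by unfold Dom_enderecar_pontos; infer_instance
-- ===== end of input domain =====

-- B replaces A's two post-hoc filtering passes (r_inicio) with a single stable sort by a boolean
-- "does not start with 'R'" key; same collection loop written with enumerate. Objective: alternative.


-- ===== PORT A =====
-- r_inicio: the two list comprehensions (item[0] == 'R' first, the rest after)
def r_inicio (lista : List String) : List String :=
  (lista.filter (fun item => PySem.Str.pyGet? item 0 == some 'R')) ++
  (lista.filter (fun item => !(PySem.Str.pyGet? item 0 == some 'R')))

def enderecar_pontos (matriz : List (List String)) : List String × (List (String × Int × Int)) :=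
  let st :=
    (PySem.List.pyRange 0 (PySem.List.len matriz) 1).foldl
      (fun st l =>
        let linha := PySem.List.pyGetD matriz l []
        (PySem.List.pyRange 0 (PySem.List.len linha) 1).foldl
          (fun st c =>
            let coluna := PySem.List.pyGetD linha c ""
            if coluna ≠ "0" then (st.1 ++ [coluna], st.2.insert coluna (l, c)) else st)
          st)
      (([] : List String), (PySem.Dict.empty : PySem.Dict String (Int × Int)))
  (r_inicio st.1, st.2.items)

-- ===== PORT B =====
def enderecar_pontos_alt (matriz : List (List String)) : List String × (List (String × Int × Int)) :=
  let st :=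
    (PySem.List.enumerate matriz 0).foldl
      (fun st p =>
        (PySem.List.enumerate p.2 0).foldl
          (fun st q =>
            if q.2 ≠ "0" then (st.1 ++ [q.2], st.2.insert q.2 (p.1, q.1)) else st)
          st)
      (([] : List String), (PySem.Dict.empty : PySem.Dict String (Int × Int)))
  (PySem.List.sorted st.1 (fun p => !(PySem.Str.startswith p "R")) false, st.2.items)

-- ===== PRECONDITION & SPEC =====
-- Pre_ excludes matrices with an empty-string cell: A collects "" (it differs from '0') and
-- r_inicio's item[0] then raises IndexError, so A returns no value there.
def Pre_enderecar_pontos (matriz : List (List String)) : Prop :=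
  matriz.all (fun linha => linha.all (fun s => !(s == ""))) = true
instance (matriz : List (List String)) : Decidable (Pre_enderecar_pontos matriz) := by
  unfold Pre_enderecar_pontos; infer_instance

def pvWitness_enderecar_pontos : List (List String) := [["0", "R1"], ["A", "R2"]]

def Spec_enderecar_pontos (matriz : List (List String)) (out : List String × (List (String × Int × Int))) : Prop := out = enderecar_pontos_alt matriz
instance (matriz : List (List String)) (out : List String × (List (String × Int × Int))) : Decidable (Spec_enderecar_pontos matriz out) := by unfold Spec_enderecar_pontos; infer_instance

-- ===== CLAIM (what is proved, stated in full; the proofs are below) =====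
def Claim_equal_enderecar_pontos : Prop := ∀ (matriz : List (List String)), Dom_enderecar_pontos matriz → Pre_enderecar_pontos matriz → Spec_enderecar_pontos matriz (enderecar_pontos matriz)

-- ===== LEMMAS AND PROOFS =====

-- A stable sort by a boolean key is the stable partition: false-key elements first, then true-key.
theorem insertBy_false_key {α : Type} (key : α → Bool) (x : α) (hx : key x = false)
    (F T : List α) (hF : ∀ y ∈ F, key y = false) (hT : ∀ y ∈ T, key y = true) :
    PySem.List.insertBy (fun a b => decide (key a < key b)) x (F ++ T) = F ++ x :: T := by
  induction F with
  | nil =>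
    cases T with
    | nil => simp [PySem.List.insertBy]
    | cons t ts =>
      have := hT t (by simp)
      simp [PySem.List.insertBy, hx, this]
  | cons f fs ih =>
    have hkf : key f = false := hF f (by simp)
    have ih' := ih (fun y hy => hF y (List.mem_cons_of_mem _ hy))
    simp only [List.cons_append, PySem.List.insertBy, hx]
    simp [hkf, ih']

theorem foldl_insertBy_partition {α : Type} (key : α → Bool) (xs : List α) :
    ∀ (F T : List α), (∀ y ∈ F, key y = false) → (∀ y ∈ T, key y = true) →
    xs.foldl (fun acc x => PySem.List.insertBy (fun a b => decide (key a < key b)) x acc) (F ++ T)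
      = (F ++ xs.filter (fun x => !key x)) ++ (T ++ xs.filter key) := by
  induction xs with
  | nil => intro F T _ _; simp
  | cons x xs ih =>
    intro F T hF hT
    cases hx : key x with
    | false =>
      have h1 := insertBy_false_key key x hx F T hF hT
      simp only [List.foldl_cons, h1]
      have hF' : ∀ y ∈ F ++ [x], key y = false := by
        intro y hy
        rcases List.mem_append.mp hy with h | h
        · exact hF y h
        · simp at h; simpa [h]
      have h2 := ih (F ++ [x]) T hF' hT
      simp only [List.append_assoc, List.cons_append, List.nil_append] at h2 ⊢
      rw [h2]
      simp [hx]
    | true =>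
      have h1 : PySem.List.insertBy (fun a b => decide (key a < key b)) x (F ++ T) = (F ++ T) ++ [x] := by
        apply PySem.List.insertBy_of_forall_not_before
        intro y _; cases key y <;> simp [hx]
      simp only [List.foldl_cons, h1, List.append_assoc]
      have hT' : ∀ y ∈ T ++ [x], key y = true := by
        intro y hy
        rcases List.mem_append.mp hy with h | h
        · exact hT y h
        · simp at h; simpa [h]
      have h2 := ih F (T ++ [x]) hF hT'
      rw [h2]
      simp [hx, List.append_assoc]

theorem sorted_bool_key {α : Type} (key : α → Bool) (xs : List α) :
    PySem.List.sorted xs key false = xs.filter (fun x => !key x) ++ xs.filter key := by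
  have := foldl_insertBy_partition key xs [] [] (by simp) (by simp)
  simpa [PySem.List.sorted_eq_foldl_insertBy] using this

-- On a non-empty string, the two R-tests of A and B agree.
theorem pyGet?_zero_eq_startswith (s : String) (hs : s ≠ "") :
    (PySem.Str.pyGet? s 0 == some 'R') = PySem.Str.startswith s "R" := by
  cases h : s.toList with
  | nil => exact absurd (by cases s; simpa using h) hs
  | cons c cs =>
    simp [PySem.Str.pyGet?, PySem.Str.startswith, PySem.Chars.pyGet?, PySem.Chars.startswith, h,
      PySem.List.pyGet?, PySem.List.pyIdx?, List.isPrefixOf, eq_comm]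

-- Every element accumulated by B's inner loop was already there or is a cell of the row.
theorem mem_inner_fold (linha : List String) :
    ∀ (c0 : Int) (st : List String × PySem.Dict String (Int × Int)) (lI : Int) (p : String),
    p ∈ ((PySem.List.enumerate linha c0).foldl
          (fun st q => if q.2 ≠ "0" then (st.1 ++ [q.2], st.2.insert q.2 (lI, q.1)) else st) st).1 →
    p ∈ st.1 ∨ p ∈ linha := by
  induction linha with
  | nil => intro c0 st lI p h; simp [PySem.List.enumerate_nil] at h; exact Or.inl h
  | cons x xs ih =>
    intro c0 st lI p h
    rw [PySem.List.enumerate_cons, List.foldl_cons] at h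
    rcases ih (c0 + 1) _ lI p h with h' | h'
    · by_cases hx : x ≠ "0" <;> simp [hx] at h'
      · rcases h' with h' | h'
        · exact Or.inl h'
        · exact Or.inr (by simp [h'])
      · exact Or.inl h'
    · exact Or.inr (List.mem_cons_of_mem _ h')

theorem mem_outer_fold (matriz : List (List String)) :
    ∀ (l0 : Int) (st : List String × PySem.Dict String (Int × Int)) (p : String),
    p ∈ ((PySem.List.enumerate matriz l0).foldl
          (fun st q =>
            (PySem.List.enumerate q.2 0).foldl
              (fun st r => if r.2 ≠ "0" then (st.1 ++ [r.2], st.2.insert r.2 (q.1, r.1)) else st) st) st).1 →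
    p ∈ st.1 ∨ ∃ linha ∈ matriz, p ∈ linha := by
  induction matriz with
  | nil => intro l0 st p h; simp [PySem.List.enumerate_nil] at h; exact Or.inl h
  | cons x xs ih =>
    intro l0 st p h
    rw [PySem.List.enumerate_cons, List.foldl_cons] at h
    rcases ih (l0 + 1) _ p h with h' | h'
    · rcases mem_inner_fold x 0 st l0 p h' with h'' | h''
      · exact Or.inl h''
      · exact Or.inr ⟨x, by simp, h''⟩
    · rcases h' with ⟨linha, hm, hp⟩
      exact Or.inr ⟨linha, by simp [hm], hp⟩

-- The two collection loops compute the same state.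
theorem fold_eq (matriz : List (List String)) :
    (PySem.List.pyRange 0 (PySem.List.len matriz) 1).foldl
      (fun st l =>
        let linha := PySem.List.pyGetD matriz l []
        (PySem.List.pyRange 0 (PySem.List.len linha) 1).foldl
          (fun st c =>
            let coluna := PySem.List.pyGetD linha c ""
            if coluna ≠ "0" then (st.1 ++ [coluna], st.2.insert coluna (l, c)) else st)
          st)
      (([] : List String), (PySem.Dict.empty : PySem.Dict String (Int × Int)))
    = (PySem.List.enumerate matriz 0).foldl
      (fun st p =>
        (PySem.List.enumerate p.2 0).foldl
          (fun st q =>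
            if q.2 ≠ "0" then (st.1 ++ [q.2], st.2.insert q.2 (p.1, q.1)) else st)
          st)
      (([] : List String), (PySem.Dict.empty : PySem.Dict String (Int × Int))) := by
  rw [PySem.List.enumerate_eq_map_pyRange matriz [], List.foldl_map]
  congr 1
  funext st l
  rw [PySem.List.enumerate_eq_map_pyRange (PySem.List.pyGetD matriz l []) "", List.foldl_map]

-- ===== VERDICT (by name: the statement is the Claim_ definition above) =====
theorem final_pair_eq (st : List String × PySem.Dict String (Int × Int))
    (hne : ∀ p ∈ st.1, p ≠ "") :
    (r_inicio st.1, st.2.items)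
      = (PySem.List.sorted st.1 (fun p => !(PySem.Str.startswith p "R")) false, st.2.items) := by
  rw [sorted_bool_key]
  refine Prod.ext ?_ rfl
  show r_inicio st.1 = _
  unfold r_inicio
  congr 1
  · refine List.filter_congr ?_
    intro p hp
    simp only [Bool.not_not]
    exact pyGet?_zero_eq_startswith p (hne p hp)
  · refine List.filter_congr ?_
    intro p hp
    rw [pyGet?_zero_eq_startswith p (hne p hp)]

theorem enderecar_pontos_spec : Claim_equal_enderecar_pontos := by
  intro matriz _ hpre0
  have hpre : ∀ linha ∈ matriz, ∀ s ∈ linha, s ≠ "" := by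
    intro linha hl s hs
    have := (List.all_eq_true.mp hpre0) linha hl
    have := (List.all_eq_true.mp this) s hs
    simpa using this
  unfold Spec_enderecar_pontos enderecar_pontos enderecar_pontos_alt
  rw [fold_eq]
  refine final_pair_eq _ ?_
  intro p hp
  rcases mem_outer_fold matriz 0 _ p hp with h | ⟨linha, hl, hpl⟩
  · simp at h
  · exact hpre linha hl p hpl
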